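-- pv_equiv track=rewrite | github.com/ookok/LivingTreeAlAgent | livingtree/core/dou_di_zhu/card_engine.py | _is_airplane
-- ===== SOURCE A (Python) =====
-- from typing import List, Dict, Tuple, Optional
-- from collections import Counter
--
-- def _is_airplane(values: List[int], value_counts: Counter) -> bool:
--     """判断飞机"""
--     # 找出所有出现3次或4次的值
--     triple_values = [v for v, c in value_counts.items() if c >= 3]
--     if len(triple_values) < 2:
--         return False
--
--     # 检查是否连续
--     triple_values = sorted(triple_values)
--     for i in range(1, len(triple_values)):
--         if triple_values[i] - triple_values[i-1] != 1:
--             return False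
--
--     # 检查总牌数是否匹配（每个三张至少带一个单张或对子）
--     min_length = len(triple_values) * 3 + len(triple_values)  # 三张 + 单张/对子
--     if len(values) < min_length:
--         return False
--
--     return True
-- ===== SOURCE B (Python) =====
-- def _is_airplane(values, value_counts):
--     triple_values = [v for v, c in value_counts.items() if c >= 3]
--     n = len(triple_values)
--     return (n >= 2
--             and max(triple_values) - min(triple_values) == n - 1
--             and len(values) >= 4 * n)
-- ===== Notes on version B (the rewrite author's own statement) =====
-- stated objective: simpler
-- what changed: The sort plus adjacent-difference loop that checks consecutiveness is replaced by a closed-form span test (max - min == count - 1, valid because dict keys are distinct), and the three early-return checks collapse into one boolean expression.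
import Mathlib
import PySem

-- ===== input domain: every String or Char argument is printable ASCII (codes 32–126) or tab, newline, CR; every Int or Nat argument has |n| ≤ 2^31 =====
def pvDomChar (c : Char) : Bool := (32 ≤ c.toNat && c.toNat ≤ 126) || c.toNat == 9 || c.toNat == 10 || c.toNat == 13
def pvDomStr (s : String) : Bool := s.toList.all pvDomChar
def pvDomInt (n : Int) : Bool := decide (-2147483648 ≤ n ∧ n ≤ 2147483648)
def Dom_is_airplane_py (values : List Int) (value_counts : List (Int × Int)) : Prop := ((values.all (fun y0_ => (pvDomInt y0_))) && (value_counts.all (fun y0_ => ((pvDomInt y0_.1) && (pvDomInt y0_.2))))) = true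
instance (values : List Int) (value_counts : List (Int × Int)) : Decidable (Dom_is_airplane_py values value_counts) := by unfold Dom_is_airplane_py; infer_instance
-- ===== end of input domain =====

-- B replaces A's sort-plus-adjacent-difference consecutiveness loop by the closed-form
-- span test max - min == count - 1 (valid because dict keys are distinct): simpler, no sort.

-- ===== PORT A =====
-- the `for i in range(1, len(triple_values))` loop over the sorted list, with its early return
def pvChain : List Int → Bool
  | a :: b :: rest => if b - a ≠ 1 then false else pvChain (b :: rest)
  | _ => true

def is_airplane_py (values : List Int) (value_counts : List (Int × Int)) : Bool :=
  let triple_values := (value_counts.filter (fun p => decide (3 ≤ p.2))).map Prod.fst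
  if triple_values.length < 2 then false
  else
    let sorted_tv := PySem.List.sorted triple_values (fun x => x) false
    if pvChain sorted_tv = false then false
    else
      let min_length := triple_values.length * 3 + triple_values.length
      if values.length < min_length then false
      else true

-- ===== PORT B =====
def is_airplane_py_alt (values : List Int) (value_counts : List (Int × Int)) : Bool :=
  let tv := (value_counts.filter (fun p => decide (3 ≤ p.2))).map Prod.fst
  let n := tv.length
  decide (2 ≤ n)
    && (((PySem.List.max? tv (fun x => x)).getD 0 - (PySem.List.min? tv (fun x => x)).getD 0)
          == (n : Int) - 1)
    && decide (4 * n ≤ values.length)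

-- ===== PRECONDITION & SPEC =====
-- Pre_ states the dict invariant only: value_counts is an association list coming from a Python
-- Counter/dict, whose keys are distinct; duplicate keys cannot arise from the Python function.
def Pre_is_airplane_py (values : List Int) (value_counts : List (Int × Int)) : Prop :=
  (value_counts.map Prod.fst).Nodup
instance (values : List Int) (value_counts : List (Int × Int)) : Decidable (Pre_is_airplane_py values value_counts) := by unfold Pre_is_airplane_py; infer_instance

def pvWitness_is_airplane_py : List Int × (List (Int × Int)) :=
  ([3, 3, 3, 4, 4, 4, 5, 6], [(3, 3), (4, 3), (5, 1), (6, 1)])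

def Spec_is_airplane_py (values : List Int) (value_counts : List (Int × Int)) (out : Bool) : Prop := out = is_airplane_py_alt values value_counts
instance (values : List Int) (value_counts : List (Int × Int)) (out : Bool) : Decidable (Spec_is_airplane_py values value_counts out) := by unfold Spec_is_airplane_py; infer_instance

-- ===== CLAIM (what is proved, stated in full; the proofs are below) =====
def Claim_equal_is_airplane_py : Prop := ∀ (values : List Int) (value_counts : List (Int × Int)), Dom_is_airplane_py values value_counts → Pre_is_airplane_py values value_counts → Spec_is_airplane_py values value_counts (is_airplane_py values value_counts)

-- ===== LEMMAS AND PROOFS =====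

-- strictly increasing list: the last element is at least head + length of the tail
theorem pvLast_ge (a : Int) (t : List Int) (h : (a :: t).Pairwise (· < ·)) :
    a + t.length ≤ t.getLastD a := by
  induction t generalizing a with
  | nil => simp
  | cons b u ih =>
    rcases List.pairwise_cons.mp h with ⟨hab, ht⟩
    have hb : a < b := hab b (List.mem_cons_self ..)
    have := ih b ht
    simp only [List.getLastD_cons, List.length_cons] at *
    omega

-- the adjacent-difference loop succeeds → last = head + tail length
theorem pvChain_last (a : Int) (t : List Int) (h : pvChain (a :: t) = true) :
    t.getLastD a = a + t.length := by
  induction t generalizing a with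
  | nil => simp
  | cons b u ih =>
    unfold pvChain at h
    split at h
    · exact absurd h (by simp)
    · have hb : b - a = 1 := by omega
      have := ih b h
      simp only [List.getLastD_cons, List.length_cons] at *
      omega

-- converse, on a strictly increasing list
theorem pvChain_of_last (a : Int) (t : List Int) (hp : (a :: t).Pairwise (· < ·))
    (h : t.getLastD a = a + t.length) : pvChain (a :: t) = true := by
  induction t generalizing a with
  | nil => rfl
  | cons b u ih =>
    rcases List.pairwise_cons.mp hp with ⟨hab, ht⟩
    have hb : a < b := hab b (List.mem_cons_self ..)
    have hge : b + u.length ≤ u.getLastD b := pvLast_ge b u ht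
    simp only [List.getLastD_cons, List.length_cons] at h
    have hb1 : b = a + 1 := by omega
    have : u.getLastD b = b + u.length := by omega
    unfold pvChain
    rw [if_neg (by omega)]
    exact ih b ht this

-- in a ≤-sorted list, every element is ≤ the last element
theorem pvLast_max (a : Int) (t : List Int) (h : (a :: t).Pairwise (· ≤ ·)) :
    ∀ y ∈ a :: t, y ≤ t.getLastD a := by
  induction t generalizing a with
  | nil => simp
  | cons b u ih =>
    rcases List.pairwise_cons.mp h with ⟨hab, ht⟩
    intro y hy
    rw [List.getLastD_cons]
    rcases List.mem_cons.mp hy with rfl | hy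
    · exact le_trans (hab b (List.mem_cons_self ..)) (ih b ht b (List.mem_cons_self ..))
    · exact ih b ht y hy

theorem pvLast_mem (a : Int) (t : List Int) : t.getLastD a ∈ a :: t := by
  induction t generalizing a with
  | nil => simp
  | cons b u ih =>
    simp only [List.getLastD_cons]
    exact List.mem_cons_of_mem a (ih b)

-- ===== VERDICT (by name: the statement is the Claim_ definition above) =====

theorem is_airplane_py_spec : Claim_equal_is_airplane_py := by
  intro values value_counts _hdom hpre
  unfold Spec_is_airplane_py is_airplane_py is_airplane_py_alt
  have hnd : ((value_counts.filter (fun p => decide (3 ≤ p.2))).map Prod.fst).Nodup :=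
    List.Nodup.sublist (List.Sublist.map Prod.fst List.filter_sublist) hpre
  set tv := (value_counts.filter (fun p => decide (3 ≤ p.2))).map Prod.fst with htv
  by_cases hlen : tv.length < 2
  · simp [hlen, show ¬ (2 ≤ tv.length) by omega]
  · replace hlen : 2 ≤ tv.length := by omega
    rw [if_neg (by omega)]
    -- tv is nonempty, so its sorted version is a cons
    have hne : tv ≠ [] := by
      intro h; rw [h] at hlen; simp at hlen
    obtain ⟨a, t, hs⟩ : ∃ a t, PySem.List.sorted tv (fun x => x) false = a :: t := by
      rcases hsl : PySem.List.sorted tv (fun x => x) false with _ | ⟨a, t⟩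
      · exact absurd ((PySem.List.sorted_eq_nil_iff _ _ _).mp hsl) hne
      · exact ⟨a, t, rfl⟩
    have hperm : (a :: t).Perm tv := hs ▸ PySem.List.sorted_perm tv (fun x => x) false
    have hple : (a :: t).Pairwise (· ≤ ·) := by
      have := PySem.List.sorted_pairwise tv (fun x => x)
      rw [hs] at this; simpa using this
    have hplt : (a :: t).Pairwise (· < ·) := by
      have hnds : (a :: t).Nodup := hperm.nodup_iff.mpr hnd
      have := List.Pairwise.and hple hnds
      exact this.imp (fun h => lt_of_le_of_ne h.1 h.2)
    have hlentv : tv.length = t.length + 1 := by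
      simpa using hperm.length_eq.symm
    -- min? tv = some a
    have hmin : PySem.List.min? tv (fun x => x) = some a := by
      rcases hm : PySem.List.min? tv (fun x => x) with _ | m
      · exact absurd ((PySem.List.min?_eq_none_iff _ _).mp hm) hne
      · have hmmem : m ∈ tv := PySem.List.min?_mem hm
        have hamem : a ∈ tv := hperm.mem_iff.mp (List.mem_cons_self ..)
        have h1 : m ≤ a := PySem.List.min?_isMin hm a hamem
        have h2 : a ≤ m := PySem.List.key_head_sorted_le tv (fun x => x) hs m hmmem
        rw [le_antisymm h1 h2]
    -- max? tv = some (t.getLastD a)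
    have hmax : PySem.List.max? tv (fun x => x) = some (t.getLastD a) := by
      rcases hm : PySem.List.max? tv (fun x => x) with _ | m
      · exact absurd ((PySem.List.max?_eq_none_iff _ _).mp hm) hne
      · have hmmem : m ∈ a :: t := hperm.mem_iff.mpr (PySem.List.max?_mem hm)
        have h1 : m ≤ t.getLastD a := pvLast_max a t hple m hmmem
        have h2 : t.getLastD a ≤ m :=
          PySem.List.max?_isMax hm _ (hperm.mem_iff.mp (pvLast_mem a t))
        rw [le_antisymm h2 h1]
    simp only [hs, hmin, hmax]
    by_cases hchain : pvChain (a :: t) = true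
    · have hlast := pvChain_last a t hchain
      rw [if_neg (by simp [hchain])]
      have heq : ((t.getLastD a - a : Int) == (tv.length : Int) - 1) = true := by
        rw [beq_iff_eq]; rw [hlast, hlentv]; push_cast; ring
      simp only [Option.getD_some, heq, decide_eq_true hlen, Bool.true_and]
      by_cases hv : values.length < tv.length * 3 + tv.length
      · simp only [if_pos hv]
        simp
        omega
      · simp [hv, (by omega : 4 * tv.length ≤ values.length)]
    · rw [if_pos (by simpa using hchain)]
      have hne2 : t.getLastD a ≠ a + t.length := by
        intro h; exact hchain (pvChain_of_last a t hplt h)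
      have heq : ((t.getLastD a - a : Int) == (tv.length : Int) - 1) = false := by
        rw [beq_eq_false_iff_ne]
        intro h; apply hne2
        rw [hlentv] at h; push_cast at h; omega
      simp
      intro _ h
      exfalso
      apply hne2
      rw [List.getLastD_eq_getLast?, hlentv] at *
      push_cast at h
      omega
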